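-- pv_equiv track=rewrite | github.com/Shalini-SDS/Pragyan- | backend/risk_engine/preprocess.py | _map_tokens_to_flags
-- ===== SOURCE A (Python) =====
-- def _map_tokens_to_flags(tokens, keyword_map):
--     flags = {key: 0 for key in keyword_map}
--     unknown = 0
--     for token in tokens:
--         if token in {'none', 'nil', 'na', 'n/a', 'no conditions', 'no known conditions'}:
--             continue
--         matched = False
--         for target, keywords in keyword_map.items():
--             if token == target.replace('_', ' ') or any(k in token for k in keywords):
--                 flags[target] = 1
--                 matched = True
--         if not matched:
--             unknown = 1
--     return flags, unknown
-- ===== SOURCE B (Python) =====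
-- _SKIP = {'none', 'nil', 'na', 'n/a', 'no conditions', 'no known conditions'}
--
--
-- def _hit(token, target, keywords):
--     return token == target.replace('_', ' ') or any(k in token for k in keywords)
--
--
-- def _map_tokens_to_flags(tokens, keyword_map):
--     live = [t for t in tokens if t not in _SKIP]
--     flags = {target: int(any(_hit(t, target, keywords) for t in live))
--              for target, keywords in keyword_map.items()}
--     unknown = int(any(not any(_hit(t, target, keywords)
--                               for target, keywords in keyword_map.items())
--                       for t in live))
--     return flags, unknown
-- ===== Notes on version B (the rewrite author's own statement) =====
-- stated objective: alternative
-- what changed: Inverts A's nesting: flags are built in one pass per target over the pre-filtered non-skipped tokens (short-circuiting on the first hit) and unknown by a separate token pass, instead of A's single token loop that mutates the flags dict entry-by-entry and maintains matched/unknown inline.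
import Mathlib
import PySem

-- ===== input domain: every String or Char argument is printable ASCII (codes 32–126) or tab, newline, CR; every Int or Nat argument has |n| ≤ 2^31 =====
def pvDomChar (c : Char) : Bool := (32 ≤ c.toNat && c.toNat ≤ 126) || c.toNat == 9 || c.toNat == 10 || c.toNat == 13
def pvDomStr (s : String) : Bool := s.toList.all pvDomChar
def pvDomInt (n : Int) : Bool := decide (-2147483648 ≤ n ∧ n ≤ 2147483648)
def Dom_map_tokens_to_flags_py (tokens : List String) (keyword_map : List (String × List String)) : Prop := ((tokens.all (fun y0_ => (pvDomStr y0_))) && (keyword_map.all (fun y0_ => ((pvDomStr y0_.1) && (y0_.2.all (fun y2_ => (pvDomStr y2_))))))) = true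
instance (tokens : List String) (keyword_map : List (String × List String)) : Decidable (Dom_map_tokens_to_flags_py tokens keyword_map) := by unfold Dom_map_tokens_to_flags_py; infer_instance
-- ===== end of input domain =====

-- B inverts A's nesting (same cost): flags are computed per-target over the non-skipped tokens and
-- unknown by a separate token pass, instead of A's single token loop mutating the dict inline.


-- shared by both ports: the Python skip-set literal and the one-line match condition of the inner `if`
def pvSkip : List String := ["none", "nil", "na", "n/a", "no conditions", "no known conditions"]

def pvHit (token : String) (kv : String × List String) : Bool :=
  token == PySem.Str.replace kv.1 "_" " " || kv.2.any (fun k => PySem.Str.isIn k token)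

-- ===== PORT A =====
-- body of A's `for target, keywords in keyword_map.items():` loop (state: flags dict, matched)
def pvInnerA (token : String) (p : PySem.Dict String Int × Bool) (kv : String × List String) :
    PySem.Dict String Int × Bool :=
  if pvHit token kv then (p.1.insert kv.1 1, true) else p

-- body of A's `for token in tokens:` loop (state: flags dict, unknown)
def pvStepA (keyword_map : List (String × List String)) (st : PySem.Dict String Int × Int)
    (token : String) : PySem.Dict String Int × Int :=
  if pvSkip.contains token then st
  else
    let inner := keyword_map.foldl (pvInnerA token) (st.1, false)
    (inner.1, if inner.2 then st.2 else 1)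

def map_tokens_to_flags_py (tokens : List String) (keyword_map : List (String × List String)) :
    (List (String × Int)) × Int :=
  let flags : PySem.Dict String Int :=
    keyword_map.foldl (fun d kv => d.insert kv.1 0) PySem.Dict.empty
  let st := tokens.foldl (pvStepA keyword_map) (flags, 0)
  (st.1.items, st.2)

-- ===== PORT B =====
def map_tokens_to_flags_py_alt (tokens : List String) (keyword_map : List (String × List String)) :
    (List (String × Int)) × Int :=
  let live := tokens.filter (fun t => !pvSkip.contains t)
  let flags := keyword_map.map (fun kv =>
    (kv.1, if live.any (fun t => pvHit t kv) then (1 : Int) else 0))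
  let unknown : Int :=
    if live.any (fun t => !keyword_map.any (fun kv => pvHit t kv)) then 1 else 0
  (flags, unknown)

-- ===== PRECONDITION & SPEC =====
-- keyword_map is a Python dict, so its keys are unique; association lists with duplicate keys do
-- not represent any Python input of this function and are excluded.
def Pre_map_tokens_to_flags_py (tokens : List String) (keyword_map : List (String × List String)) : Prop :=
  (keyword_map.map Prod.fst).Nodup
instance (tokens : List String) (keyword_map : List (String × List String)) : Decidable (Pre_map_tokens_to_flags_py tokens keyword_map) := by unfold Pre_map_tokens_to_flags_py; infer_instance

def pvWitness_map_tokens_to_flags_py : List String × (List (String × List String)) :=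
  (["flu", "none"], [("heart_disease", ["heart"]), ("diabetes", ["diab"])])

def Spec_map_tokens_to_flags_py (tokens : List String) (keyword_map : List (String × List String)) (out : (List (String × Int)) × Int) : Prop := out = map_tokens_to_flags_py_alt tokens keyword_map
instance (tokens : List String) (keyword_map : List (String × List String)) (out : (List (String × Int)) × Int) : Decidable (Spec_map_tokens_to_flags_py tokens keyword_map out) := by unfold Spec_map_tokens_to_flags_py; infer_instance

-- ===== CLAIM (what is proved, stated in full; the proofs are below) =====
def Claim_equal_map_tokens_to_flags_py : Prop := ∀ (tokens : List String) (keyword_map : List (String × List String)), Dom_map_tokens_to_flags_py tokens keyword_map → Pre_map_tokens_to_flags_py tokens keyword_map → Spec_map_tokens_to_flags_py tokens keyword_map (map_tokens_to_flags_py tokens keyword_map)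

-- ===== LEMMAS AND PROOFS =====

-- A's inner loop: starting from a dict shaped like km with values f, it sets to 1 the entries of the
-- processed sublist l that the token hits; matched records whether any entry of l was hit.
theorem pv_innerA (km : List (String × List String)) (t : String)
    (l : List (String × List String)) (hl : ∀ kv ∈ l, kv ∈ km)
    (f : String × List String → Int) (d : PySem.Dict String Int) (m : Bool)
    (hd : d.items = km.map (fun kv => (kv.1, f kv))) :
    (l.foldl (pvInnerA t) (d, m)).1.items
      = km.map (fun kv => (kv.1, if l.any (fun p => p.1 == kv.1 && pvHit t p) then 1 else f kv))
    ∧ (l.foldl (pvInnerA t) (d, m)).2 = (m || l.any (fun kv => pvHit t kv)) := by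
  induction l generalizing f d m with
  | nil => simpa using hd
  | cons a rest ih =>
    have ha : a ∈ km := hl a (by simp)
    have hrest : ∀ kv ∈ rest, kv ∈ km := fun kv h => hl kv (by simp [h])
    by_cases h : pvHit t a = true
    · have hcont : d.contains a.1 = true := by
        rw [PySem.Dict.contains_iff_mem_keys]
        simp only [PySem.Dict.keys, hd, List.map_map]
        exact List.mem_map.mpr ⟨a, ha, rfl⟩
      have hd' : (d.insert a.1 1).items
          = km.map (fun kv => (kv.1, if kv.1 == a.1 then 1 else f kv)) := by
        rw [PySem.Dict.items_insert_of_contains d 1 hcont, hd, List.map_map]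
        apply List.map_congr_left
        intro kv hkv
        by_cases hk : kv.1 = a.1 <;> simp [hk]
      obtain ⟨h1, h2⟩ := ih hrest _ _ true hd'
      have hstep : pvInnerA t (d, m) a = (d.insert a.1 1, true) := by simp [pvInnerA, h]
      rw [List.foldl_cons, hstep]
      constructor
      · rw [h1]
        apply List.map_congr_left
        intro kv hkv
        simp only [List.any_cons, h, Bool.and_true]
        by_cases hr : (rest.any fun p => p.1 == kv.1 && pvHit t p) = true
        · simp [hr]
        · simp only [hr]
          by_cases hk : kv.1 = a.1
          · simp [hk]
          · have hk' : ¬ a.1 = kv.1 := fun he => hk he.symm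
            simp [hk, hk']
      · rw [h2]
        simp [List.any_cons, h]
    · have hstep : pvInnerA t (d, m) a = (d, m) := by simp [pvInnerA, h]
      obtain ⟨h1, h2⟩ := ih hrest f d m hd
      rw [List.foldl_cons, hstep]
      have hf : pvHit t a = false := by simpa using h
      refine ⟨?_, by simp [h2, List.any_cons, hf]⟩
      rw [h1]
      apply List.map_congr_left
      intro kv hkv
      simp only [List.any_cons, hf, Bool.and_false, Bool.false_or]

-- A's outer loop invariant: flags values become 1 for entries hit by some processed non-skipped
-- token, unknown becomes 1 if some processed non-skipped token hit no entry at all.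
theorem pv_outerA (km : List (String × List String)) (ts : List String)
    (g : String × List String → Int) (d : PySem.Dict String Int) (u : Int)
    (hd : d.items = km.map (fun kv => (kv.1, g kv))) :
    (ts.foldl (pvStepA km) (d, u)).1.items
      = km.map (fun kv => (kv.1,
          if ts.any (fun t => !pvSkip.contains t && km.any (fun p => p.1 == kv.1 && pvHit t p))
          then 1 else g kv))
    ∧ (ts.foldl (pvStepA km) (d, u)).2
      = (if ts.any (fun t => !pvSkip.contains t && !km.any (fun kv => pvHit t kv)) then 1 else u) := by
  induction ts generalizing g d u with
  | nil => simp [hd]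
  | cons t ts ih =>
    by_cases hs : pvSkip.contains t = true
    · have hstep : pvStepA km (d, u) t = (d, u) := by unfold pvStepA; rw [if_pos hs]
      rw [List.foldl_cons, hstep]
      obtain ⟨h1, h2⟩ := ih g d u hd
      simp only [List.any_cons, hs, Bool.not_true, Bool.false_and, Bool.false_or]
      exact ⟨h1, h2⟩
    · obtain ⟨hi1, hi2⟩ := pv_innerA km t km (fun kv h => h) g d false hd
      have hstep : pvStepA km (d, u) t
          = ((km.foldl (pvInnerA t) (d, false)).1,
             if (km.foldl (pvInnerA t) (d, false)).2 then u else 1) := by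
        unfold pvStepA; rw [if_neg hs]
      rw [List.foldl_cons, hstep]
      simp only [Bool.false_or] at hi2
      have hs' : pvSkip.contains t = false := by simpa using hs
      obtain ⟨h1, h2⟩ := ih (fun kv => if km.any (fun p => p.1 == kv.1 && pvHit t p) = true then 1 else g kv)
        (km.foldl (pvInnerA t) (d, false)).1
        (if (km.foldl (pvInnerA t) (d, false)).2 then u else 1) hi1
      constructor
      · rw [h1]
        apply List.map_congr_left
        intro kv hkv
        simp only [List.any_cons, hs', Bool.not_false, Bool.true_and]
        by_cases hr : (ts.any fun t => !pvSkip.contains t && km.any fun p => p.1 == kv.1 && pvHit t p) = true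
        · rw [if_pos hr, if_pos (by rw [hr, Bool.or_true])]
        · have hrf : (ts.any fun t => !pvSkip.contains t && km.any fun p => p.1 == kv.1 && pvHit t p) = false := by
            simpa using hr
          rw [if_neg hr, hrf, Bool.or_false]
      · rw [h2, hi2]
        simp only [List.any_cons, hs', Bool.not_false, Bool.true_and]
        by_cases hr : (ts.any fun t => !pvSkip.contains t && !km.any fun kv => pvHit t kv) = true
        · rw [if_pos hr, if_pos (by rw [hr, Bool.or_true])]
        · have hrf : (ts.any fun t => !pvSkip.contains t && !km.any fun kv => pvHit t kv) = false := by
            simpa using hr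
          rw [if_neg hr, hrf, Bool.or_false]
          by_cases hc : (km.any fun kv => pvHit t kv) = true
          · rw [if_pos hc, if_neg (by rw [hc]; simp)]
          · have hcf : (km.any fun kv => pvHit t kv) = false := by simpa using hc
            rw [if_neg hc, hcf, if_pos (by simp)]

-- with unique keys, scanning km for an entry with kv's key that the token hits is just pvHit t kv
theorem pv_any_key {km : List (String × List String)} (hnd : (km.map Prod.fst).Nodup)
    {kv : String × List String} (hkv : kv ∈ km) (t : String) :
    (km.any fun p => p.1 == kv.1 && pvHit t p) = pvHit t kv := by
  cases hh : pvHit t kv with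
  | true =>
    rw [List.any_eq_true]
    exact ⟨kv, hkv, by rw [hh]; simp⟩
  | false =>
    rw [List.any_eq_false]
    intro p hp
    simp only [Bool.and_eq_true, beq_iff_eq, not_and]
    intro hkey
    have : p = kv := List.inj_on_of_nodup_map hnd hp hkv hkey
    rw [this, hh]
    simp

-- ===== VERDICT (by name: the statement is the Claim_ definition above) =====
theorem map_tokens_to_flags_py_spec : Claim_equal_map_tokens_to_flags_py := by
  intro tokens km _ hpre
  unfold Pre_map_tokens_to_flags_py at hpre
  unfold Spec_map_tokens_to_flags_py
  have hinit : (km.foldl (fun d kv => d.insert kv.1 (0 : Int)) PySem.Dict.empty).items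
      = km.map (fun kv => (kv.1, (0 : Int))) := by
    rw [PySem.Dict.items_foldl_insert_fresh km Prod.fst (fun _ => (0 : Int)) PySem.Dict.empty
      (fun a _ => PySem.Dict.contains_empty a.1) hpre]
    simp [show PySem.Dict.empty.items = ([] : List (String × Int)) from rfl]
  obtain ⟨h1, h2⟩ := pv_outerA km tokens (fun _ => 0) _ 0 hinit
  simp only [map_tokens_to_flags_py, map_tokens_to_flags_py_alt]
  refine Prod.ext ?_ ?_
  · simp only [h1]
    apply List.map_congr_left
    intro kv hkv
    rw [List.any_filter]
    have : (fun t => !pvSkip.contains t && km.any fun p => p.1 == kv.1 && pvHit t p)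
        = (fun t => !pvSkip.contains t && pvHit t kv) := by
      funext t; rw [pv_any_key hpre hkv t]
    rw [this]
  · simp only [h2]
    rw [List.any_filter]
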